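-- pv_equiv track=rewrite | github.com/157114/DenoiseKG | denoise_kg/merge.py | build_canonical_map
-- ===== SOURCE A (Python) =====
-- from typing import List, Dict, Optional
--
-- def build_canonical_map(pairs: List[Dict]) -> Dict[str, str]:
--
--     parent = {}
--     def find_set(v):
--         if v not in parent: parent[v] = v
--         if v == parent[v]: return v
--         parent[v] = find_set(parent[v])
--         return parent[v]
--     def unite_sets(a, b):
--         a_root, b_root = find_set(a), find_set(b)
--         if a_root != b_root:
--             if a_root < b_root: parent[b_root] = a_root
--             else: parent[a_root] = b_root
--     for pair in pairs: unite_sets(pair['node1'], pair['node2'])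
--     return {node: find_set(node) for node in parent}
-- ===== SOURCE B (Python) =====
-- from typing import List, Dict
--
-- def build_canonical_map(pairs: List[Dict]) -> Dict[str, str]:
--     # Flat label map: each node maps directly to its component's minimum label;
--     # a merge rewrites the larger label to the smaller one everywhere.
--     canon = {}
--     for pair in pairs:
--         u, v = pair['node1'], pair['node2']
--         ru = canon.setdefault(u, u)
--         rv = canon.setdefault(v, v)
--         if ru != rv:
--             m, o = (ru, rv) if ru < rv else (rv, ru)
--             canon = {k: (m if x == o else x) for k, x in canon.items()}
--     return canon
-- ===== Notes on version B (the rewrite author's own statement) =====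
-- stated objective: simpler
-- what changed: Replaces the recursive union-find forest with path compression by a flat node-to-label dictionary where a merge rewrites the larger of the two labels to the smaller one across all values, so no parent pointers, recursion or final find pass remain.
import Mathlib
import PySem

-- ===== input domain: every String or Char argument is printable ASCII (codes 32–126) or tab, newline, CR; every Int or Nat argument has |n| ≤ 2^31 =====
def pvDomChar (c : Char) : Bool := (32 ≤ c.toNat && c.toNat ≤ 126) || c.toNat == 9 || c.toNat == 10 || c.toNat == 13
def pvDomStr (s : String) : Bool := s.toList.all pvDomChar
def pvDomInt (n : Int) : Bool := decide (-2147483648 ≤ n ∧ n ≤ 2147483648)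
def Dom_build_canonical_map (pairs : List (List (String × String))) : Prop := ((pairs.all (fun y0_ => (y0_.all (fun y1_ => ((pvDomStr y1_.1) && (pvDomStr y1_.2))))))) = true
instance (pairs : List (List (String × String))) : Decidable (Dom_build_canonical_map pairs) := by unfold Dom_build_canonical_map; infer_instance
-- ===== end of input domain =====

-- B replaces the union-find forest (recursive find with path compression) by a flat
-- node→label dictionary whose merge rewrites the larger label to the smaller one in a
-- single pass over the values; objective: simpler (no recursion, no final find pass).

-- ===== PORT A =====
-- find_set, transliterated; the Nat fuel is only a totality guard for the recursion on
-- parent pointers (the call sites pass size+1, which always suffices: parent chains are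
-- strictly decreasing over distinct keys, as the proofs below establish).
def pvFindA : Nat → PySem.Dict String String → String → String × PySem.Dict String String
  | 0, d, v => (v, d)
  | f+1, d, v =>
    let d1 := if d.contains v then d else d.insert v v  -- if v not in parent: parent[v] = v
    let p := d1.getD v v                                 -- parent[v]
    if v = p then (v, d1)                                -- if v == parent[v]: return v
    else
      let res := pvFindA f d1 p                          -- find_set(parent[v])
      (res.1, res.2.insert v res.1)                      -- parent[v] = …; return parent[v]

def pvUniteA (d : PySem.Dict String String) (a b : String) : PySem.Dict String String :=
  let fa := pvFindA (d.size + 1) d a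
  let fb := pvFindA (fa.2.size + 1) fa.2 b
  if fa.1 ≠ fb.1 then
    (if fa.1 < fb.1 then fb.2.insert fb.1 fa.1 else fb.2.insert fa.1 fb.1)
  else fb.2

def build_canonical_map (pairs : List (List (String × String))) : List (String × String) :=
  let d := pairs.foldl (fun d pair =>
      pvUniteA d ((PySem.Dict.mk pair).getD "node1" "") ((PySem.Dict.mk pair).getD "node2" "")) PySem.Dict.empty
  ((d.keys).foldl (fun st k =>
      let f := pvFindA (st.2.size + 1) st.2 k
      (st.1.insert k f.1, f.2)) ((PySem.Dict.empty : PySem.Dict String String), d)).1.items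

-- ===== PORT B =====
def pvMergeB (c : PySem.Dict String String) (u v : String) : PySem.Dict String String :=
  let c1 := c.setdefault u u
  let ru := c1.getD u u
  let c2 := c1.setdefault v v
  let rv := c2.getD v v
  if ru ≠ rv then
    let m := if ru < rv then ru else rv
    let o := if ru < rv then rv else ru
    PySem.Dict.mk (c2.items.map (fun p => (p.1, if p.2 = o then m else p.2)))
  else c2

def build_canonical_map_alt (pairs : List (List (String × String))) : List (String × String) :=
  (pairs.foldl (fun c pair =>
      pvMergeB c ((PySem.Dict.mk pair).getD "node1" "") ((PySem.Dict.mk pair).getD "node2" "")) PySem.Dict.empty).items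

-- ===== PRECONDITION & SPEC =====
-- Pre_ excludes exactly the inputs where Python A raises KeyError: a pair missing the
-- 'node1' or 'node2' key.
def Pre_build_canonical_map (pairs : List (List (String × String))) : Prop :=
  ∀ p ∈ pairs, (PySem.Dict.mk p).contains "node1" = true ∧ (PySem.Dict.mk p).contains "node2" = true

instance (pairs : List (List (String × String))) : Decidable (Pre_build_canonical_map pairs) := by
  unfold Pre_build_canonical_map; infer_instance

def pvWitness_build_canonical_map : (List (List (String × String))) :=
  [[("node1", "b"), ("node2", "a")], [("node1", "a"), ("node2", "c")]]

def Spec_build_canonical_map (pairs : List (List (String × String))) (out : List (String × String)) : Prop := out = build_canonical_map_alt pairs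
instance (pairs : List (List (String × String))) (out : List (String × String)) : Decidable (Spec_build_canonical_map pairs out) := by unfold Spec_build_canonical_map; infer_instance

-- ===== CLAIM (what is proved, stated in full; the proofs are below) =====
def Claim_equal_build_canonical_map : Prop := ∀ (pairs : List (List (String × String))), Dom_build_canonical_map pairs → Pre_build_canonical_map pairs → Spec_build_canonical_map pairs (build_canonical_map pairs)

-- ===== LEMMAS AND PROOFS =====

-- The coupling invariant between A's parent forest d and B's flat label map c:
-- same keys (same order), parent pointers stay inside the same B-class and decrease,
-- forest roots are exactly the self-labelled nodes, and labels are self-labelled minima.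
def pvInv (d c : PySem.Dict String String) : Prop :=
  d.keys = c.keys ∧ c.keys.Nodup ∧
  (∀ k p, d.get? k = some p → c.get? k = c.get? p ∧ p ≤ k) ∧
  (∀ k, d.get? k = some k ↔ c.get? k = some k) ∧
  (∀ k m, c.get? k = some m → c.get? m = some m ∧ m ≤ k)

-- number of keys strictly below v: the termination measure of find_set
def pvMu (d : PySem.Dict String String) (v : String) : Nat :=
  (d.keys.filter (fun k => decide (k < v))).length

theorem pvMu_le_size (d : PySem.Dict String String) (v : String) : pvMu d v ≤ d.size := by
  unfold pvMu
  calc (d.keys.filter (fun k => decide (k < v))).length ≤ d.keys.length :=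
        List.length_filter_le _ _
    _ = d.size := by simp [PySem.Dict.keys, PySem.Dict.size]

theorem pvMemKeys (c : PySem.Dict String String) (k w : String)
    (hw : c.get? k = some w) : k ∈ c.keys := by
  by_contra hn
  rw [← PySem.Dict.get?_eq_none_iff_not_mem_keys] at hn
  simp [hn] at hw

theorem pvMu_lt {l : List String} {p v : String} (hp : p ∈ l) (hpv : p < v) :
    (l.filter (fun k => decide (k < p))).length < (l.filter (fun k => decide (k < v))).length := by
  obtain ⟨s, t, rfl⟩ := List.append_of_mem hp
  simp only [List.filter_append, List.length_append, List.filter_cons, decide_eq_true_eq,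
    lt_irrefl, if_false, hpv, if_true, List.length_cons]
  have hs : ∀ u : List String, (List.filter (fun k => decide (k < p)) u).length ≤
      (List.filter (fun k => decide (k < v)) u).length := by
    intro u
    simp only [← List.countP_eq_length_filter]
    exact List.countP_mono_left (fun a _ hq => by
      simp only [decide_eq_true_eq] at hq ⊢; exact lt_trans hq hpv)
  have := hs s; have := hs t; omega

theorem pvFindA_spec (f : Nat) (d c : PySem.Dict String String) (v : String)
    (h : pvInv d c) (hf : pvMu d v < f) :
    pvInv (pvFindA f d v).2 (c.setdefault v v) ∧
    (c.setdefault v v).get? v = some (pvFindA f d v).1 := by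
  induction f generalizing d v with
  | zero => omega
  | succ f ih =>
    obtain ⟨hkeys, hnd, h3, h4, h5⟩ := h
    by_cases hcv : d.contains v = true
    · -- v is already a key of the forest
      have hcc : c.contains v = true := by
        rw [PySem.Dict.contains_iff_mem_keys] at hcv ⊢
        rwa [hkeys] at hcv
      rw [PySem.Dict.setdefault_of_contains _ _ hcc]
      have hgs : (d.get? v).isSome := by rw [← PySem.Dict.contains_eq_isSome_get?, hcv]
      obtain ⟨p, hget⟩ := Option.isSome_iff_exists.mp hgs
      have hgetD : d.getD v v = p := by rw [PySem.Dict.getD_eq_get?_getD, hget]; rfl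
      by_cases hvp : v = p
      · simp only [pvFindA, hcv, if_true, hgetD, if_pos hvp]
        subst hvp
        exact ⟨⟨hkeys, hnd, h3, h4, h5⟩, (h4 v).mp hget⟩
      · simp only [pvFindA, hcv, if_true, hgetD, if_neg hvp]
        obtain ⟨hcvcp, hple⟩ := h3 v p hget
        have hplt : p < v := lt_of_le_of_ne hple (fun e => hvp e.symm)
        have hcvs : (c.get? v).isSome := by rw [← PySem.Dict.contains_eq_isSome_get?, hcc]
        have hcps : (c.get? p).isSome := by rwa [hcvcp] at hcvs
        obtain ⟨rv, hrv⟩ := Option.isSome_iff_exists.mp hcps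
        have hpmem : p ∈ c.keys := pvMemKeys c p rv hrv
        have hmu : pvMu d p < f := by
          have := pvMu_lt (l := d.keys) (p := p) (v := v) (by rw [hkeys]; exact hpmem) hplt
          unfold pvMu at hf ⊢
          omega
        have hIH := ih d p ⟨hkeys, hnd, h3, h4, h5⟩ hmu
        have hcpp : c.contains p = true := by
          rw [PySem.Dict.contains_iff_mem_keys]; exact hpmem
        rw [PySem.Dict.setdefault_of_contains _ _ hcpp] at hIH
        obtain ⟨⟨hk2, hn2, h32, h42, h52⟩, hr⟩ := hIH
        have hcvr : c.get? v = some (pvFindA f d p).1 := by rw [hcvcp]; exact hr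
        obtain ⟨hcrr, hrlep⟩ := h5 p _ hr
        have hvmem2 : (pvFindA f d p).2.contains v = true := by
          rw [PySem.Dict.contains_iff_mem_keys, hk2, ← hkeys,
            ← PySem.Dict.contains_iff_mem_keys]
          exact hcv
        refine ⟨⟨?_, hn2, ?_, ?_, h5⟩, hcvr⟩
        · rw [PySem.Dict.keys_insert_of_contains _ _ hvmem2]; exact hk2
        · intro k q hq
          rw [PySem.Dict.get?_insert] at hq
          split_ifs at hq with hkv
          · cases hq; subst hkv
            exact ⟨by rw [hcvr, hcrr], le_trans hrlep hple⟩
          · exact h32 k q hq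
        · intro k
          rw [PySem.Dict.get?_insert]
          split_ifs with hkv
          · subst hkv
            constructor
            · intro he
              rw [Option.some_inj] at he
              rw [he] at hcvr; exact hcvr
            · intro he
              rw [hcvr] at he
              rw [Option.some_inj] at he
              rw [he]
          · exact h42 k
    · -- v is fresh: both sides append v ↦ v
      have hccf : c.contains v = false := by
        rw [Bool.eq_false_iff]
        intro hcc
        rw [PySem.Dict.contains_iff_mem_keys, ← hkeys,
          ← PySem.Dict.contains_iff_mem_keys] at hcc
        exact hcv hcc
      have hcvf : d.contains v = false := Bool.eq_false_iff.mpr hcv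
      rw [PySem.Dict.setdefault_of_not_contains _ _ hccf]
      have hvnm : v ∉ c.keys := by
        rw [← PySem.Dict.contains_iff_mem_keys]
        simp [hccf]
      simp only [pvFindA, hcvf, Bool.false_eq_true, if_false,
        PySem.Dict.getD_insert_self, if_true]
      refine ⟨⟨?_, PySem.Dict.nodup_keys_insert c v v hnd, ?_, ?_, ?_⟩,
        PySem.Dict.get?_insert_self c v v⟩
      · rw [PySem.Dict.keys_insert_of_not_contains _ _ hcvf,
          PySem.Dict.keys_insert_of_not_contains _ _ hccf, hkeys]
      · intro k p hp
        rw [PySem.Dict.get?_insert] at hp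
        rw [PySem.Dict.get?_insert, PySem.Dict.get?_insert]
        split_ifs at hp with hkv
        · cases hp; subst hkv
          simp
        · obtain ⟨e1, e2⟩ := h3 k p hp
          have hks : (c.get? k).isSome := by
            have := pvMemKeys c k
            have hkm : k ∈ d.keys := by
              by_contra hn
              rw [← PySem.Dict.get?_eq_none_iff_not_mem_keys] at hn
              simp [hn] at hp
            rw [hkeys] at hkm
            rw [← PySem.Dict.contains_eq_isSome_get?, PySem.Dict.contains_iff_mem_keys]
            exact hkm
          have hps : (c.get? p).isSome := by rwa [e1] at hks
          obtain ⟨w, hw⟩ := Option.isSome_iff_exists.mp hps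
          have hpne : ¬ p = v := fun e => hvnm (e ▸ pvMemKeys c p w hw)
          rw [if_neg hkv, if_neg hpne]
          exact ⟨e1, e2⟩
      · intro k
        rw [PySem.Dict.get?_insert, PySem.Dict.get?_insert]
        split_ifs with hkv
        · subst hkv; simp
        · exact h4 k
      · intro k m hm
        rw [PySem.Dict.get?_insert] at hm
        split_ifs at hm with hkv
        · subst hkv
          injection hm with hm'
          subst hm'
          exact ⟨PySem.Dict.get?_insert_self _ _ _, le_refl _⟩
        · obtain ⟨e1, e2⟩ := h5 k m hm
          have hmne : ¬ m = v := fun e => hvnm (e ▸ pvMemKeys c m m e1)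
          rw [PySem.Dict.get?_insert, if_neg hmne]
          exact ⟨e1, e2⟩

theorem pvGetMapped (l : List (String × String)) (g : String → String) (x : String) :
    (PySem.Dict.mk (l.map (fun p => (p.1, g p.2)))).get? x
      = ((PySem.Dict.mk l).get? x).map g := by
  induction l with
  | nil => rfl
  | cons a t ih =>
    obtain ⟨a1, a2⟩ := a
    simp only [List.map_cons]
    rw [PySem.Dict.get?_mk_cons, PySem.Dict.get?_mk_cons]
    by_cases h : (a1 == x) = true
    · rw [if_pos h, if_pos h]; rfl
    · rw [if_neg h, if_neg h]; exact ih

theorem pvMerge_inv (d c : PySem.Dict String String) (h : pvInv d c) (o m : String)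
    (hmo : m < o) (ho : c.get? o = some o) (hm : c.get? m = some m) :
    pvInv (d.insert o m)
      (PySem.Dict.mk (c.items.map (fun p => (p.1, if p.2 = o then m else p.2)))) := by
  obtain ⟨hkeys, hnd, h3, h4, h5⟩ := h
  have hmo' : m ≠ o := ne_of_lt hmo
  have hmk : PySem.Dict.mk c.items = c := PySem.Dict.ext rfl
  have hget : ∀ x, (PySem.Dict.mk (c.items.map (fun p => (p.1, if p.2 = o then m else p.2)))).get? x
      = (c.get? x).map (fun w => if w = o then m else w) := by
    intro x
    have := pvGetMapped c.items (fun w => if w = o then m else w) x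
    rw [hmk] at this
    exact this
  have hkeys' : (PySem.Dict.mk (c.items.map (fun p => (p.1, if p.2 = o then m else p.2)))).keys
      = c.keys := by
    simp [List.map_map, Function.comp, PySem.Dict.keys]
  have hdo : d.contains o = true := by
    rw [PySem.Dict.contains_iff_mem_keys, hkeys]
    exact pvMemKeys c o o ho
  refine ⟨?_, ?_, ?_, ?_, ?_⟩
  · rw [PySem.Dict.keys_insert_of_contains _ _ hdo, hkeys, hkeys']
  · rw [hkeys']; exact hnd
  · intro k p hp
    rw [PySem.Dict.get?_insert] at hp
    rw [hget, hget]
    split_ifs at hp with hko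
    · injection hp with hp'
      subst hp'; subst hko
      rw [ho, hm]
      refine ⟨?_, le_of_lt hmo⟩
      simp [hmo']
    · obtain ⟨e1, e2⟩ := h3 k p hp
      rw [e1]
      exact ⟨rfl, e2⟩
  · intro k
    rw [PySem.Dict.get?_insert, hget]
    split_ifs with hko
    · subst hko
      rw [ho]
      constructor
      · intro he; exact absurd (Option.some_inj.mp he) hmo'
      · intro he
        simp only [Option.map_some, if_true] at he
        exact absurd (Option.some_inj.mp he) hmo'
    · constructor
      · intro he
        rw [(h4 k).mp he]
        simp [hko]
      · intro he
        cases hw : c.get? k with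
        | none => rw [hw] at he; simp at he
        | some w =>
          rw [hw] at he
          simp only [Option.map_some, Option.some_inj] at he
          by_cases hwo : w = o
          · rw [if_pos hwo] at he
            subst he; subst hwo
            obtain ⟨_, e2⟩ := h5 m w hw
            exact absurd (lt_of_lt_of_le hmo e2) (lt_irrefl m)
          · rw [if_neg hwo] at he
            subst he
            exact (h4 _).mpr hw
  · intro k m' hm'
    rw [hget] at hm'
    cases hw : c.get? k with
    | none => rw [hw] at hm'; simp at hm'
    | some w =>
      rw [hw] at hm'
      simp only [Option.map_some, Option.some_inj] at hm'
      obtain ⟨e1, e2⟩ := h5 k w hw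
      by_cases hwo : w = o
      · rw [if_pos hwo] at hm'
        subst hm'
        rw [hget, hm]
        refine ⟨by simp [hmo'], ?_⟩
        exact le_trans (le_of_lt hmo) (hwo ▸ e2)
      · rw [if_neg hwo] at hm'
        subst hm'
        rw [hget, e1]
        exact ⟨by simp [hwo], e2⟩

theorem pvStep_spec (d c : PySem.Dict String String) (u v : String) (h : pvInv d c) :
    pvInv (pvUniteA d u v) (pvMergeB c u v) := by
  have h1 := pvFindA_spec (d.size + 1) d c u h (Nat.lt_succ_of_le (pvMu_le_size d u))
  simp only [pvUniteA, pvMergeB]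
  obtain ⟨hI1, hg1⟩ := h1
  generalize hfa : pvFindA (d.size + 1) d u = fa at hI1 hg1 ⊢
  obtain ⟨r1, d1⟩ := fa
  dsimp only at hI1 hg1 ⊢
  have h2 := pvFindA_spec (d1.size + 1) d1 (c.setdefault u u) v hI1
    (Nat.lt_succ_of_le (pvMu_le_size d1 v))
  obtain ⟨hI2, hg2⟩ := h2
  generalize hfb : pvFindA (d1.size + 1) d1 v = fb at hI2 hg2 ⊢
  obtain ⟨r2, d2⟩ := fb
  dsimp only at hI2 hg2 ⊢
  have hru : (c.setdefault u u).getD u u = r1 := by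
    rw [PySem.Dict.getD_eq_get?_getD, hg1]; rfl
  have hrv : ((c.setdefault u u).setdefault v v).getD v v = r2 := by
    rw [PySem.Dict.getD_eq_get?_getD, hg2]; rfl
  rw [hru, hrv]
  by_cases hne : r1 = r2
  · simp only [hne, ne_eq, not_true_eq_false, if_false]
    exact hI2
  · have hI1' := hI1
    obtain ⟨-, -, -, -, h5c1⟩ := hI1'
    have hI2' := hI2
    obtain ⟨-, -, -, -, h5c2⟩ := hI2'
    have hc1ar : (c.setdefault u u).get? r1 = some r1 := (h5c1 u r1 hg1).1
    have harmem : r1 ∈ (c.setdefault u u).keys := pvMemKeys _ r1 r1 hc1ar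
    have hc2ar : ((c.setdefault u u).setdefault v v).get? r1 = some r1 := by
      by_cases hvc : (c.setdefault u u).contains v = true
      · rw [PySem.Dict.setdefault_of_contains _ _ hvc]; exact hc1ar
      · rw [PySem.Dict.setdefault_of_not_contains _ _ (Bool.eq_false_iff.mpr hvc)]
        rw [PySem.Dict.get?_insert]
        split_ifs with he
        · exact absurd (by rw [PySem.Dict.contains_iff_mem_keys]; exact he ▸ harmem) hvc
        · exact hc1ar
    have hc2br : ((c.setdefault u u).setdefault v v).get? r2 = some r2 := (h5c2 v r2 hg2).1
    simp only [ne_eq, hne, not_false_eq_true, if_true]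
    by_cases hlt : r1 < r2
    · simp only [hlt, if_true]
      exact pvMerge_inv d2 _ hI2 r2 r1 hlt hc2br hc2ar
    · have hbl : r2 < r1 := lt_of_le_of_ne (not_lt.mp hlt) (fun e => hne e.symm)
      simp only [hlt, if_false]
      exact pvMerge_inv d2 _ hI2 r1 r2 hbl hc2ar hc2br

theorem pvOut_loop (c : PySem.Dict String String) (ks : List String)
    (d acc : PySem.Dict String String) (h : pvInv d c) (hks : ∀ k ∈ ks, k ∈ c.keys) :
    (ks.foldl (fun st k =>
        let f := pvFindA (st.2.size + 1) st.2 k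
        (st.1.insert k f.1, f.2)) (acc, d)).1
      = ks.foldl (fun a k => a.insert k (c.getD k k)) acc := by
  induction ks generalizing d acc with
  | nil => rfl
  | cons k ks ih =>
    simp only [List.foldl_cons]
    have hkm : k ∈ c.keys := hks k (List.mem_cons_self ..)
    have hcc : c.contains k = true := by
      rw [PySem.Dict.contains_iff_mem_keys]; exact hkm
    have hspec := pvFindA_spec (d.size + 1) d c k h (Nat.lt_succ_of_le (pvMu_le_size d k))
    rw [PySem.Dict.setdefault_of_contains _ _ hcc] at hspec
    obtain ⟨hI, hg⟩ := hspec
    have hval : (pvFindA (d.size + 1) d k).1 = c.getD k k := by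
      rw [PySem.Dict.getD_eq_get?_getD, hg]; rfl
    rw [hval]
    exact ih (pvFindA (d.size + 1) d k).2 (acc.insert k (c.getD k k)) hI
      (fun x hx => hks x (List.mem_cons_of_mem _ hx))

theorem pvItems_fold (c : PySem.Dict String String) (h : c.keys.Nodup) :
    (c.keys.foldl (fun a k => a.insert k (c.getD k k)) PySem.Dict.empty).items = c.items := by
  have h2 : (c.keys.map (fun a => a)).Nodup := by simpa using h
  have hf := PySem.Dict.items_foldl_insert_fresh c.keys (fun a => a) (fun a => c.getD a a)
    PySem.Dict.empty (fun a _ => PySem.Dict.contains_empty a) h2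
  simp only at hf
  have hei : (PySem.Dict.empty : PySem.Dict String String).items = [] := rfl
  rw [hf, hei, PySem.Dict.items_eq_map_keys c h "", List.nil_append]
  exact List.map_congr_left (fun a ha => by
    have hs : (c.get? a).isSome := by
      rw [← PySem.Dict.contains_eq_isSome_get?, PySem.Dict.contains_iff_mem_keys]
      exact ha
    obtain ⟨w, hw⟩ := Option.isSome_iff_exists.mp hs
    rw [PySem.Dict.getD_eq_get?_getD, PySem.Dict.getD_eq_get?_getD, hw]; rfl)

theorem pvFold_inv (pairs : List (List (String × String))) (d c : PySem.Dict String String)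
    (h : pvInv d c) :
    pvInv (pairs.foldl (fun d pair =>
        pvUniteA d ((PySem.Dict.mk pair).getD "node1" "") ((PySem.Dict.mk pair).getD "node2" "")) d)
      (pairs.foldl (fun c pair =>
        pvMergeB c ((PySem.Dict.mk pair).getD "node1" "") ((PySem.Dict.mk pair).getD "node2" "")) c) := by
  induction pairs generalizing d c with
  | nil => exact h
  | cons p ps ih =>
    simp only [List.foldl_cons]
    exact ih _ _ (pvStep_spec d c _ _ h)

-- ===== VERDICT (by name: the statement is the Claim_ definition above) =====
theorem build_canonical_map_spec : Claim_equal_build_canonical_map := by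
  intro pairs _ _
  unfold Spec_build_canonical_map
  simp only [build_canonical_map, build_canonical_map_alt]
  have hempty : pvInv PySem.Dict.empty PySem.Dict.empty := by
    refine ⟨rfl, ?_, ?_, ?_, ?_⟩ <;>
      simp [PySem.Dict.keys, PySem.Dict.empty, PySem.Dict.get?]
  have hInv := pvFold_inv pairs PySem.Dict.empty PySem.Dict.empty hempty
  have hInv' := hInv
  obtain ⟨hkeq, hnd, -, -, -⟩ := hInv'
  have hout := pvOut_loop _ (pairs.foldl (fun d pair =>
      pvUniteA d ((PySem.Dict.mk pair).getD "node1" "") ((PySem.Dict.mk pair).getD "node2" "")) PySem.Dict.empty).keys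
    (pairs.foldl (fun d pair =>
      pvUniteA d ((PySem.Dict.mk pair).getD "node1" "") ((PySem.Dict.mk pair).getD "node2" "")) PySem.Dict.empty)
    PySem.Dict.empty hInv (fun k hk => by rw [← hkeq]; exact hk)
  rw [hout, hkeq]
  exact pvItems_fold _ hnd
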